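-- pv_equiv track=rewrite | github.com/VKLuhadia/SOC-2024 | soc24mathlib.py | get_generator
-- ===== SOURCE A (Python) =====
-- def pow(a: int, b: int, m: int) -> int:
--     """
--     Calculates (a ^ b) % m using Fast Exponentiation Method or Double-and-Add Algorithm.
--
--     Args:
--         a (int): A positive integer.
--         b (int): A positive integer.
--         m (int): A positive integer.
--
--     Returns:
--         int: (a ^ b) % m.
--     """
--     result = 1
--     a = a % m
--     while b > 0:
--         if b % 2 == 1:
--             result = (result * a) % m
--         b //= 2
--         a = (a * a) % m
--     return result
--
-- def is_prime(n: int) -> bool: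
--     """
--     Check if a given integer is a prime number using the Miller-Rabin primality test.
--
--     Args:
--         n (int): A positive integer.
--
--     Returns:
--         bool: True if n is a prime number, else False.
--     """
--
--     def miller_rabin_test(d: int, n: int, a: int) -> bool:
--         x = pow(a, d, n)
--         if x == 1 or x == n - 1:
--             return True
--         while d != n - 1:
--             x = (x * x) % n
--             d *= 2
--             if x == 1:
--                 return False
--             if x == n - 1:
--                 return True
--         return False
--
--     if n <= 1:
--         return False
--     if n <= 3:
--         return True
--     if n % 2 == 0:
--         return False
--
--     d = n - 1
--     while d % 2 == 0:
--         d //= 2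
--
--     bases = [2, 3, 5, 7, 11, 13, 17, 19, 23, 29, 31, 37]
--
--     for a in bases:
--         if a >= n:
--             break
--         if not miller_rabin_test(d, n, a):
--             return False
--
--     return True
--
-- def get_generator(p: int) -> int:
--     """
--     Find a generator of the multiplicative group of integers modulo p.
--
--     Args:
--         p (int): A prime positive integer.
--
--     Returns:
--         int: A generator of the multiplicative group (Z_p)^*.
--
--     Raises:
--         ValueError: If p is composite.
--     """
--     if not is_prime(p):
--         raise ValueError("p must be a prime number")
--
--     if p == 2:
--         return 1
--
--     for g in range(2, p):
--         if pow(g, (p - 1) // 2, p) != 1 and pow(g, p - 1, p) == 1: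
--             return g
--
--     raise ValueError("Failed to find a generator")
-- ===== SOURCE B (Python) =====
-- def jacobi(a: int, n: int) -> int:
--     """Jacobi symbol (a/n) for odd n > 0, via binary quadratic reciprocity."""
--     a %= n
--     result = 1
--     while a != 0:
--         while a % 2 == 0:
--             a //= 2
--             if n % 8 in (3, 5):
--                 result = -result
--         a, n = n, a
--         if a % 4 == 3 and n % 4 == 3:
--             result = -result
--         a %= n
--     return result if n == 1 else 0
--
-- def get_generator(p: int) -> int:
--     # primality by exact trial division up to sqrt(p)
--     if p < 2:
--         raise ValueError("p must be a prime number")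
--     d = 2
--     while d * d <= p:
--         if p % d == 0:
--             raise ValueError("p must be a prime number")
--         d += 1
--     if p == 2:
--         return 1
--     # smallest quadratic non-residue = smallest generator condition used by A
--     g = next((g for g in range(2, p) if jacobi(g, p) == -1), None)
--     if g is None:
--         raise ValueError("Failed to find a generator")
--     return g
-- ===== Notes on version B (the rewrite author's own statement) =====
-- stated objective: alternative
-- what changed: B replaces A's Miller-Rabin primality guard by exact trial division up to sqrt(p), and tests each candidate g with one binary Jacobi-symbol (quadratic reciprocity) evaluation via a functional next(...) search instead of A's two modular exponentiations per candidate.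
import Mathlib
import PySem

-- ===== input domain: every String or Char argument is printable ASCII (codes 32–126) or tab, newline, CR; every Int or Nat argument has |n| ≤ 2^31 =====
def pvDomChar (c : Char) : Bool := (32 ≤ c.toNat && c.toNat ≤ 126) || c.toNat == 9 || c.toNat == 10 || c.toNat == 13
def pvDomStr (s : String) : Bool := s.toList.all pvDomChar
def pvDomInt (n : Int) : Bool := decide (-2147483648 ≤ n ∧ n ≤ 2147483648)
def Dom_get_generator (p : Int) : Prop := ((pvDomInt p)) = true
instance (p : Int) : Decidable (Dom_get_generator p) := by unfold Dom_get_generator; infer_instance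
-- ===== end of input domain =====

-- B replaces A's Miller-Rabin guard by exact trial division up to sqrt(p) and tests each
-- candidate with one binary Jacobi-symbol evaluation instead of two modular exponentiations
-- (alternative algorithm, same return value on every prime p; both raise on composite p).

-- ===== PORT A =====
-- module helper `pow`; while-loop over b as recursion on b.toNat
def pvPowLoop (result a b m : Int) : Int :=
  if _h : 0 < b then
    pvPowLoop (if PySem.Int.mod b 2 = 1 then PySem.Int.mod (result * a) m else result)
      (PySem.Int.mod (a * a) m) (PySem.Int.floordiv b 2) m
  else result
termination_by b.toNat
decreasing_by
  have h2 : PySem.Int.floordiv b 2 = b / 2 := PySem.Int.floordiv_eq_ediv_of_pos (by norm_num)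
  rw [h2]; omega

def pvPow (a b m : Int) : Int := pvPowLoop 1 (PySem.Int.mod a m) b m

-- inner while of miller_rabin_test; fuel = n.toNat is never exhausted on the inputs
-- is_prime reaches it (d doubles from the odd part of n-1 and hits n-1 exactly)
def pvMRLoop (fuel : Nat) (x d n : Int) : Bool :=
  match fuel with
  | 0 => false
  | fuel + 1 =>
    if d ≠ n - 1 then
      let x' := PySem.Int.mod (x * x) n
      if x' = 1 then false
      else if x' = n - 1 then true
      else pvMRLoop fuel x' (d * 2) n
    else false

def pvMillerRabinTest (d n a : Int) : Bool :=
  let x := pvPow a d n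
  if x = 1 ∨ x = n - 1 then true
  else pvMRLoop n.toNat x d n

-- `while d % 2 == 0: d //= 2`; fuel = n.toNat suffices for the d = n-1 ≥ 4 it is called on
def pvOddPart (fuel : Nat) (d : Int) : Int :=
  match fuel with
  | 0 => d
  | fuel + 1 => if PySem.Int.mod d 2 = 0 then pvOddPart fuel (PySem.Int.floordiv d 2) else d

def pvBasesLoop (n d : Int) : List Int → Bool
  | [] => true
  | a :: rest =>
    if a ≥ n then true
    else if ¬ pvMillerRabinTest d n a then false
    else pvBasesLoop n d rest

def pvIsPrime (n : Int) : Bool :=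
  if n ≤ 1 then false
  else if n ≤ 3 then true
  else if PySem.Int.mod n 2 = 0 then false
  else pvBasesLoop n ((pvOddPart n.toNat (n - 1))) [2, 3, 5, 7, 11, 13, 17, 19, 23, 29, 31, 37]

-- `for g in range(2, p): if …: return g` as a counter recursion (range is lazy in Python);
-- fallthrough raise ValueError ↦ 0 (outside Pre_)
def pvGenLoopA (p g : Int) : Int :=
  if _h : g < p then
    if pvPow g (PySem.Int.floordiv (p - 1) 2) p ≠ 1 ∧ pvPow g (p - 1) p = 1 then g
    else pvGenLoopA p (g + 1)
  else 0
termination_by (p - g).toNat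

def get_generator (p : Int) : Int :=
  if ¬ pvIsPrime p then 0            -- raise ValueError ↦ 0 (outside Pre_)
  else if p = 2 then 1
  else pvGenLoopA p 2

-- ===== PORT B =====
-- inner `while a % 2 == 0` of jacobi; fuel = a.toNat is never exhausted (a > 0 halves away)
def pvJacStrip (fuel : Nat) (a n result : Int) : Int × Int :=
  match fuel with
  | 0 => (a, result)
  | fuel + 1 =>
    if PySem.Int.mod a 2 = 0 then
      pvJacStrip fuel (PySem.Int.floordiv a 2) n
        (if PySem.Int.mod n 8 = 3 ∨ PySem.Int.mod n 8 = 5 then -result else result)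
    else (a, result)

-- outer `while a != 0` of jacobi; fuel = a.toNat + 1 is never exhausted (a strictly decreases)
def pvJacLoop (fuel : Nat) (a n result : Int) : Int :=
  match fuel with
  | 0 => 0
  | fuel + 1 =>
    if a ≠ 0 then
      let s := pvJacStrip a.toNat a n result
      let r2 := if PySem.Int.mod n 4 = 3 ∧ PySem.Int.mod s.1 4 = 3 then -s.2 else s.2
      pvJacLoop fuel (PySem.Int.mod n s.1) s.1 r2
    else if n = 1 then result else 0

def pvJacobi (a n : Int) : Int :=
  pvJacLoop ((PySem.Int.mod a n).toNat + 1) (PySem.Int.mod a n) n 1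

-- `while d * d <= p: if p % d == 0: raise; d += 1` — exact trial division
def pvTrial (p d : Int) : Bool :=
  if _h : d * d ≤ p then
    if PySem.Int.mod p d = 0 then false else pvTrial p (d + 1)
  else true
termination_by (p + 1 - d).toNat
decreasing_by
  have hd : d ≤ p := by
    by_cases h : d ≤ 0
    · nlinarith [mul_self_nonneg d]
    · nlinarith
  omega

-- `next((g for g in range(2, p) if jacobi(g, p) == -1), None)`: the generator is lazy, so the
-- search is ported as the bounded recursion it performs; exhaustion (None/raise) ↦ 0 (outside Pre_)
def pvScanB (p g : Int) : Int :=
  if _h : g < p then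
    if pvJacobi g p == -1 then g else pvScanB p (g + 1)
  else 0
termination_by (p - g).toNat

def get_generator_alt (p : Int) : Int :=
  if p < 2 then 0                    -- raise ValueError ↦ 0 (outside Pre_)
  else if ¬ pvTrial p 2 then 0       -- raise ValueError ↦ 0 (outside Pre_)
  else if p = 2 then 1
  else pvScanB p 2

-- ===== PRECONDITION & SPEC =====
-- Pre_ excludes exactly the composite/small p on which A raises ValueError
def Pre_get_generator (p : Int) : Prop := 2 ≤ p ∧ Nat.Prime p.toNat
instance (p : Int) : Decidable (Pre_get_generator p) := by unfold Pre_get_generator; infer_instance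
def pvWitness_get_generator : Int := (7)

def Spec_get_generator (p : Int) (out : Int) : Prop := out = get_generator_alt p
instance (p : Int) (out : Int) : Decidable (Spec_get_generator p out) := by unfold Spec_get_generator; infer_instance

-- ===== CLAIM (what is proved, stated in full; the proofs are below) =====
def Claim_equal_get_generator : Prop := ∀ (p : Int), Dom_get_generator p → Pre_get_generator p → Spec_get_generator p (get_generator p)

-- ===== LEMMAS AND PROOFS =====

lemma pvPowLoop_eq (m : Int) (hm : 0 < m) :
    ∀ b : Int, 0 ≤ b → ∀ r a : Int, 0 ≤ r → r < m →
      pvPowLoop r a b m = (r * a ^ b.toNat) % m := by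
  suffices H : ∀ n : ℕ, ∀ b : Int, 0 ≤ b → b.toNat ≤ n → ∀ r a : Int, 0 ≤ r → r < m →
      pvPowLoop r a b m = (r * a ^ b.toNat) % m by
    exact fun b hb => H b.toNat b hb le_rfl
  intro n
  induction n with
  | zero =>
    intro b hb hbn r a hr hrm
    have hb0 : b = 0 := by omega
    subst hb0
    rw [pvPowLoop]
    simp [Int.emod_eq_of_lt hr hrm]
  | succ n ih =>
    intro b hb hbn r a hr hrm
    rw [pvPowLoop]
    by_cases hpos : 0 < b
    · rw [dif_pos hpos]
      have hfd : PySem.Int.floordiv b 2 = b / 2 := PySem.Int.floordiv_eq_ediv_of_pos (by norm_num)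
      have hmd : PySem.Int.mod b 2 = b % 2 := PySem.Int.mod_eq_emod_of_pos (by norm_num)
      have hmm : PySem.Int.mod (r * a) m = (r * a) % m := PySem.Int.mod_eq_emod_of_pos hm
      have hma : PySem.Int.mod (a * a) m = (a * a) % m := PySem.Int.mod_eq_emod_of_pos hm
      set k := (b / 2).toNat with hk
      have hbt : b.toNat = 2 * k + (b % 2).toNat := by omega
      have hr' : ∀ x : Int, 0 ≤ x % m ∧ x % m < m :=
        fun x => ⟨Int.emod_nonneg x (by omega), Int.emod_lt_of_pos x hm⟩
      have hca : Int.ModEq m ((a*a) % m) (a*a) := Int.emod_emod_of_dvd _ dvd_rfl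
      rw [hfd, hmd, hma]
      by_cases hodd : b % 2 = 1
      · rw [if_pos hodd, hmm]
        rw [ih (b/2) (by omega) (by omega) ((r*a)%m) ((a*a)%m) (hr' _).1 (hr' _).2]
        have hcr : Int.ModEq m ((r*a) % m) (r*a) := Int.emod_emod_of_dvd _ dvd_rfl
        have : Int.ModEq m (((r*a)%m) * ((a*a)%m) ^ k) (r * a ^ b.toNat) := by
          calc ((r*a)%m) * ((a*a)%m) ^ k ≡ (r*a) * (a*a) ^ k [ZMOD m] := hcr.mul (hca.pow k)
          _ = r * a ^ b.toNat := by rw [hbt]; have h1 : (b%2).toNat = 1 := by omega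
                                    rw [h1]; ring
        exact this
      · rw [if_neg (by omega)]
        rw [ih (b/2) (by omega) (by omega) r ((a*a)%m) hr hrm]
        have : Int.ModEq m (r * ((a*a)%m) ^ k) (r * a ^ b.toNat) := by
          calc r * ((a*a)%m) ^ k ≡ r * (a*a) ^ k [ZMOD m] := (Int.ModEq.refl r).mul (hca.pow k)
          _ = r * a ^ b.toNat := by rw [hbt]; have h0 : (b%2).toNat = 0 := by omega
                                    rw [h0]; ring
        exact this
    · rw [dif_neg hpos]
      have hb0 : b = 0 := by omega
      subst hb0
      simp [Int.emod_eq_of_lt hr hrm]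

lemma pvPow_eq (a b m : Int) (hb : 0 ≤ b) (hm : 1 < m) :
    pvPow a b m = a ^ b.toNat % m := by
  unfold pvPow
  rw [PySem.Int.mod_eq_emod_of_pos (by omega),
    pvPowLoop_eq m (by omega) b hb 1 (a % m) (by omega) (by omega)]
  have : Int.ModEq m (1 * (a % m) ^ b.toNat) (a ^ b.toNat) := by
    calc 1 * (a % m) ^ b.toNat ≡ 1 * a ^ b.toNat [ZMOD m] :=
      (Int.ModEq.refl 1).mul (Int.ModEq.pow _ (Int.emod_emod_of_dvd a dvd_rfl))
    _ = a ^ b.toNat := one_mul _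
  exact this

-- (z.val : ℤ) = a^n % p for z = (a : ZMod p)^n
lemma val_pow_bridge (p : Int) (hp : 1 < p) (a : Int) (n : ℕ) :
    ((((a : ZMod p.toNat) ^ n).val : ℤ)) = a ^ n % p := by
  haveI : NeZero p.toNat := ⟨by omega⟩
  have hpP : ((p.toNat : ℕ) : ℤ) = p := Int.toNat_of_nonneg (by omega)
  have h1 : ((a : ZMod p.toNat) ^ n) = (((a ^ n : ℤ)) : ZMod p.toNat) := by push_cast; ring
  rw [h1, ZMod.val_intCast, hpP]

lemma val_eq_one_iff (p : Int) (hp : 1 < p) (z : ZMod p.toNat) :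
    ((z.val : ℤ) = 1) ↔ z = 1 := by
  haveI : NeZero p.toNat := ⟨by omega⟩
  constructor
  · intro h
    have hv : z.val = 1 := by omega
    have := congrArg (fun v : ℕ => (v : ZMod p.toNat)) hv
    simpa [ZMod.natCast_val, ZMod.cast_id] using this
  · intro h
    subst h
    rw [ZMod.val_one_eq_one_mod, Nat.mod_eq_of_lt (by omega)]
    simp

lemma val_eq_neg_one_iff (p : Int) (hp : 1 < p) (z : ZMod p.toNat) :
    ((z.val : ℤ) = p - 1) ↔ z = -1 := by
  haveI : NeZero p.toNat := ⟨by omega⟩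
  have hcast : (((p.toNat - 1 : ℕ)) : ZMod p.toNat) = -1 := by
    push_cast [Nat.cast_sub (by omega : 1 ≤ p.toNat)]
    norm_num
  constructor
  · intro h
    have hv : z.val = p.toNat - 1 := by omega
    have := congrArg (fun v : ℕ => (v : ZMod p.toNat)) hv
    simpa [ZMod.natCast_val, ZMod.cast_id, hcast] using this
  · intro h
    subst h
    rw [← hcast, ZMod.val_cast_of_lt (by omega)]
    omega

lemma pow_emod_eq_one_iff (p : Int) (hp : 1 < p) (g : Int) (n : ℕ) :
    g ^ n % p = 1 ↔ (g : ZMod p.toNat) ^ n = 1 := by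
  rw [← val_pow_bridge p hp, val_eq_one_iff p hp]

-- Miller-Rabin accepts every odd prime p > 3 at every base 2 ≤ a < p
lemma mr_true (p : Int) (hp : 3 < p) (hP : Nat.Prime p.toNat)
    (d : Int) (hd2 : d % 2 = 1) (hd0 : 0 < d) (k : ℕ) (hdk : d * 2 ^ k = p - 1)
    (a : Int) (ha : 2 ≤ a) (hap : a < p) :
    pvMillerRabinTest d p a = true := by
  haveI : Fact (p.toNat.Prime) := ⟨hP⟩
  haveI : NeZero p.toNat := ⟨by have := hP.one_lt; omega⟩
  have hp1 : (1 : Int) < p := by omega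
  have hane : (a : ZMod p.toNat) ≠ 0 := by
    intro h0
    rw [ZMod.intCast_zmod_eq_zero_iff_dvd] at h0
    have := Int.le_of_dvd (by omega) h0
    omega
  -- powers tower
  set X : ℕ → ZMod p.toNat := fun j => (a : ZMod p.toNat) ^ (d.toNat * 2 ^ j) with hX
  have hdkN : d.toNat * 2 ^ k = p.toNat - 1 := by
    have h1 : (d.toNat : ℤ) = d := Int.toNat_of_nonneg (by omega)
    have : ((d.toNat * 2 ^ k : ℕ) : ℤ) = p - 1 := by push_cast [h1]; omega
    omega
  have hXk : X k = 1 := by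
    rw [hX]
    simp only [hdkN]
    exact ZMod.pow_card_sub_one_eq_one hane
  have hXsq : ∀ j : ℕ, X j * X j = X (j + 1) := by
    intro j
    rw [hX]
    simp only [← pow_add]
    congr 1
    ring
  -- the value computed by pvPow is the val of X 0
  have hx0 : pvPow a d p = ((X 0).val : ℤ) := by
    rw [pvPow_eq a d p (by omega) hp1, hX]
    simp [val_pow_bridge p hp1]
  unfold pvMillerRabinTest
  by_cases hinit : pvPow a d p = 1 ∨ pvPow a d p = p - 1
  · simp [hinit]
  · rw [if_neg hinit]
    rw [not_or] at hinit
    obtain ⟨hne1, hnem1⟩ := hinit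
    have hX0ne1 : X 0 ≠ 1 := fun h => hne1 (by rw [hx0, val_eq_one_iff p hp1]; exact h)
    have hX0nem1 : X 0 ≠ -1 := fun h => hnem1 (by rw [hx0, val_eq_neg_one_iff p hp1]; exact h)
    have hex : ∃ i, X i = 1 := ⟨k, hXk⟩
    set i := Nat.find hex with hi
    have hXi : X i = 1 := Nat.find_spec hex
    have hmin : ∀ j, j < i → X j ≠ 1 := fun j hj => Nat.find_min hex hj
    have hik : i ≤ k := Nat.find_min' hex hXk
    have hi0 : i ≠ 0 := fun h => hX0ne1 (h ▸ hXi)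
    have hXprev : X (i - 1) = -1 := by
      have hsq : X (i - 1) * X (i - 1) = 1 := by
        rw [hXsq (i - 1)]
        have : i - 1 + 1 = i := by omega
        rw [this]; exact hXi
      rcases mul_self_eq_one_iff.mp hsq with h1 | h1
      · exact absurd h1 (hmin (i - 1) (by omega))
      · exact h1
    have hi2 : 2 ≤ i := by
      rcases Nat.lt_or_ge i 2 with h | h
      · interval_cases i
        · omega
        · exact absurd hXprev hX0nem1
      · exact h
    -- loop invariant: entering at tower level j (j ≤ i-2) with enough fuel returns true
    have hloop : ∀ fuel : ℕ, ∀ j : ℕ, j + 2 ≤ i → i ≤ fuel + j + 1 →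
        pvMRLoop fuel ((X j).val : ℤ) (d * 2 ^ j) p = true := by
      intro fuel
      induction fuel with
      | zero => intro j h1 h2; omega
      | succ fuel ih =>
        intro j h1 h2
        have hjk : j < k := by omega
        have hcond : d * 2 ^ j ≠ p - 1 := by
          intro h
          rw [← hdk] at h
          have h2j : (2:ℤ) ^ j < 2 ^ k := by
            have := pow_lt_pow_right₀ (by norm_num : (1:ℤ) < 2) hjk
            exact this
          nlinarith [pow_pos (by norm_num : (0:ℤ) < 2) j]
        rw [pvMRLoop, if_pos hcond]
        have hsqval : PySem.Int.mod (((X j).val : ℤ) * ((X j).val : ℤ)) p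
            = ((X (j + 1)).val : ℤ) := by
          rw [PySem.Int.mod_eq_emod_of_pos (by omega), ← hXsq j, ZMod.val_mul]
          have hpP : ((p.toNat : ℕ) : ℤ) = p := Int.toNat_of_nonneg (by omega)
          push_cast
          rw [hpP]
        rw [hsqval]
        have hnot1 : ((X (j + 1)).val : ℤ) ≠ 1 :=
          fun h => hmin (j + 1) (by omega) ((val_eq_one_iff p hp1 _).mp h)
        rw [if_neg hnot1]
        by_cases hm1 : ((X (j + 1)).val : ℤ) = p - 1
        · rw [if_pos hm1]
        · rw [if_neg hm1]
          have hj1 : j + 1 ≠ i - 1 := by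
            intro h
            apply hm1
            rw [val_eq_neg_one_iff p hp1, h]
            exact hXprev
          have : d * 2 ^ j * 2 = d * 2 ^ (j + 1) := by ring
          rw [this]
          exact ih (j + 1) (by omega) (by omega)
    have hd20 : d * 2 ^ 0 = d := by ring
    have hfuel : i ≤ p.toNat + 1 := by
      have hk2 : (k : ℤ) < 2 ^ k := by exact_mod_cast Nat.lt_two_pow_self
      have h2k : (2:ℤ) ^ k ≤ p - 1 := by nlinarith [pow_pos (by norm_num : (0:ℤ) < 2) k]
      omega
    have := hloop p.toNat 0 (by omega) (by omega)
    rw [pow_zero, mul_one] at this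
    rw [hx0]
    exact this

lemma pvOddPart_spec : ∀ fuel : ℕ, ∀ m : Int, 0 < m → m.toNat ≤ fuel →
    (pvOddPart fuel m) % 2 = 1 ∧ 0 < pvOddPart fuel m ∧
      ∃ k : ℕ, pvOddPart fuel m * 2 ^ k = m := by
  intro fuel
  induction fuel with
  | zero => intro m hm hf; omega
  | succ fuel ih =>
    intro m hm hf
    have hmd : PySem.Int.mod m 2 = m % 2 := PySem.Int.mod_eq_emod_of_pos (by norm_num)
    have hfd : PySem.Int.floordiv m 2 = m / 2 := PySem.Int.floordiv_eq_ediv_of_pos (by norm_num)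
    by_cases he : m % 2 = 0
    · have hstep : pvOddPart (fuel + 1) m = pvOddPart fuel (m / 2) := by
        simp only [pvOddPart, hmd, he, if_true, hfd]
      obtain ⟨h1, h2, kk, hk⟩ := ih (m / 2) (by omega) (by omega)
      rw [hstep]
      refine ⟨h1, h2, kk + 1, ?_⟩
      rw [pow_succ, ← mul_assoc, hk]
      omega
    · have hstep : pvOddPart (fuel + 1) m = m := by
        simp only [pvOddPart, hmd, he, if_false]
      rw [hstep]
      exact ⟨by omega, hm, 0, by ring⟩

lemma bases_loop_true (p d0 : Int) (hp : 3 < p) (hP : Nat.Prime p.toNat)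
    (hd2 : d0 % 2 = 1) (hd0 : 0 < d0) (k : ℕ) (hdk : d0 * 2 ^ k = p - 1) :
    ∀ l : List Int, (∀ a ∈ l, 2 ≤ a) → pvBasesLoop p d0 l = true := by
  intro l
  induction l with
  | nil => intro _; rfl
  | cons a rest ih =>
    intro hall
    rw [pvBasesLoop]
    by_cases hge : a ≥ p
    · rw [if_pos hge]
    · rw [if_neg hge]
      have hmr : pvMillerRabinTest d0 p a = true :=
        mr_true p hp hP d0 hd2 hd0 k hdk a (hall a (List.mem_cons_self)) (by omega)
      rw [hmr]
      simp only [not_true_eq_false, if_false]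
      exact ih (fun b hb => hall b (List.mem_cons_of_mem a hb))

lemma pvIsPrime_of_prime (p : Int) (hp2 : 2 ≤ p) (hP : Nat.Prime p.toNat) :
    pvIsPrime p = true := by
  unfold pvIsPrime
  rw [if_neg (by omega)]
  by_cases hp3 : p ≤ 3
  · rw [if_pos hp3]
  · rw [if_neg hp3]
    have hodd : p % 2 = 1 := by
      rcases Int.emod_two_eq p with h | h
      · exfalso
        have h2 : (2 : ℕ) ∣ p.toNat := by
          have : (2 : ℤ) ∣ p := Int.dvd_of_emod_eq_zero h
          omega
        have := (Nat.Prime.eq_one_or_self_of_dvd hP 2 h2)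
        omega
      · exact h
    rw [PySem.Int.mod_eq_emod_of_pos (by norm_num : (0:ℤ) < 2), hodd,
      if_neg (by norm_num)]
    obtain ⟨h1, h2, k, hk⟩ := pvOddPart_spec p.toNat (p - 1) (by omega) (by omega)
    exact bases_loop_true p _ (by omega) hP h1 h2 k hk _ (by decide)

lemma pvTrial_of_prime (p : Int) (hp2 : 2 ≤ p) (hP : Nat.Prime p.toNat) :
    ∀ n : ℕ, ∀ d : Int, (p + 1 - d).toNat ≤ n → 2 ≤ d → pvTrial p d = true := by
  intro n
  induction n with
  | zero =>
    intro d hn hd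
    have hdp : p + 1 ≤ d := by omega
    rw [pvTrial, dif_neg (by nlinarith)]
  | succ n ih =>
    intro d hn hd
    rw [pvTrial]
    by_cases hdd : d * d ≤ p
    · rw [dif_pos hdd]
      have hmod : PySem.Int.mod p d = p % d := PySem.Int.mod_eq_emod_of_pos (by omega)
      have hne : p % d ≠ 0 := by
        intro h0
        have hdvd : (d.toNat : ℕ) ∣ p.toNat := by
          have : d ∣ p := Int.dvd_of_emod_eq_zero h0
          have hdc : (d.toNat : ℤ) = d := Int.toNat_of_nonneg (by omega)
          have hpc : (p.toNat : ℤ) = p := Int.toNat_of_nonneg (by omega)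
          rw [← Int.natCast_dvd_natCast, hdc, hpc]
          exact this
        rcases Nat.Prime.eq_one_or_self_of_dvd hP d.toNat hdvd with h | h
        · omega
        · have hdp : d = p := by omega
          nlinarith
      rw [hmod, if_neg hne]
      have hdp : d ≤ p := by nlinarith
      exact ih (d + 1) (by omega) (by omega)
    · rw [dif_neg hdd]

lemma jacStrip_spec (N : ℕ) (hN : Odd N) :
    ∀ fuel : ℕ, ∀ a r : Int, 0 < a → a.toNat ≤ fuel →
      Odd (pvJacStrip fuel a (N : ℤ) r).1 ∧ 0 < (pvJacStrip fuel a (N : ℤ) r).1 ∧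
      (pvJacStrip fuel a (N : ℤ) r).1 ≤ a ∧
      (pvJacStrip fuel a (N : ℤ) r).2 * jacobiSym (pvJacStrip fuel a (N : ℤ) r).1 N
        = r * jacobiSym a N := by
  have hN2 : N % 2 = 1 := Nat.odd_iff.mp hN
  intro fuel
  induction fuel with
  | zero => intro a r ha hf; omega
  | succ fuel ih =>
    intro a r ha hf
    have hm2 : PySem.Int.mod a 2 = a % 2 := PySem.Int.mod_eq_emod_of_pos (by norm_num)
    by_cases hae : a % 2 = 0
    · have hstep : pvJacStrip (fuel + 1) a (N : ℤ) r
          = pvJacStrip fuel (PySem.Int.floordiv a 2) (N : ℤ)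
              (if PySem.Int.mod (N : ℤ) 8 = 3 ∨ PySem.Int.mod (N : ℤ) 8 = 5 then -r else r) := by
        simp only [pvJacStrip, hm2, hae, if_true]
      set r' := if PySem.Int.mod (N : ℤ) 8 = 3 ∨ PySem.Int.mod (N : ℤ) 8 = 5 then -r else r with hr'
      have hfd : PySem.Int.floordiv a 2 = a / 2 := PySem.Int.floordiv_eq_ediv_of_pos (by norm_num)
      have hc : 0 < a / 2 := by omega
      have hcf : (a / 2).toNat ≤ fuel := by omega
      obtain ⟨h1, h2, h3, h4⟩ := ih (a / 2) r' hc hcf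
      rw [hstep, hfd]
      refine ⟨h1, h2, by omega, ?_⟩
      rw [h4]
      have ha2 : a = 2 * (a / 2) := by omega
      have hsplit : jacobiSym a N = ZMod.χ₈ (N : ZMod 8) * jacobiSym (a / 2) N := by
        conv_lhs => rw [ha2]
        rw [jacobiSym.mul_left, jacobiSym.at_two hN]
      have hm8 : PySem.Int.mod (N : ℤ) 8 = ((N % 8 : ℕ) : ℤ) := by
        rw [PySem.Int.mod_eq_emod_of_pos (by norm_num)]
        push_cast
        rfl
      have hchi : ZMod.χ₈ (N : ZMod 8) = if N % 8 = 1 ∨ N % 8 = 7 then 1 else -1 := by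
        rw [ZMod.χ₈_nat_eq_if_mod_eight, if_neg (by omega)]
      by_cases h35 : N % 8 = 3 ∨ N % 8 = 5
      · have : PySem.Int.mod (N : ℤ) 8 = 3 ∨ PySem.Int.mod (N : ℤ) 8 = 5 := by
          rw [hm8]; rcases h35 with h | h <;> [left; right] <;> rw [h] <;> norm_num
        rw [hr', if_pos this, hsplit, hchi, if_neg (by omega)]
        ring
      · have : ¬ (PySem.Int.mod (N : ℤ) 8 = 3 ∨ PySem.Int.mod (N : ℤ) 8 = 5) := by
          rw [hm8]; omega
        rw [hr', if_neg this, hsplit, hchi, if_pos (by omega)]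
        ring
    · have hstep : pvJacStrip (fuel + 1) a (N : ℤ) r = (a, r) := by
        simp only [pvJacStrip, hm2, hae, if_false]
      rw [hstep]
      exact ⟨Int.odd_iff.mpr (by omega), ha, le_rfl, rfl⟩

lemma jacLoop_spec :
    ∀ fuel : ℕ, ∀ a r : Int, ∀ N : ℕ, Odd N → 0 < N → 0 ≤ a → a.toNat < fuel →
      pvJacLoop fuel a (N : ℤ) r = r * jacobiSym a N := by
  intro fuel
  induction fuel with
  | zero => intro a r N _ _ _ hf; omega
  | succ fuel ih =>
    intro a r N hN hN0 ha hf
    have hN2 : N % 2 = 1 := Nat.odd_iff.mp hN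
    by_cases ha0 : a = 0
    · subst ha0
      have hstep : pvJacLoop (fuel + 1) 0 (N : ℤ) r
          = if (N : ℤ) = 1 then r else 0 := by
        simp only [pvJacLoop, ne_eq, not_true_eq_false, if_false]
      rw [hstep]
      by_cases hN1 : N = 1
      · subst hN1
        rw [if_pos (by norm_num), jacobiSym.one_right]
        ring
      · rw [if_neg (by exact_mod_cast hN1), jacobiSym.zero_left (by omega)]
        ring
    · have hap : 0 < a := by omega
      obtain ⟨hodd, hpos, hle, heq⟩ := jacStrip_spec N hN a.toNat a r hap le_rfl
      set s := pvJacStrip a.toNat a (N : ℤ) r with hs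
      set r2 := if PySem.Int.mod (N : ℤ) 4 = 3 ∧ PySem.Int.mod s.1 4 = 3 then -s.2 else s.2
        with hr2
      have hstep : pvJacLoop (fuel + 1) a (N : ℤ) r
          = pvJacLoop fuel (PySem.Int.mod (N : ℤ) s.1) s.1 r2 := by
        simp only [pvJacLoop, ne_eq, ha0, not_false_eq_true, if_true, ← hs, ← hr2]
      set M := s.1.toNat with hM
      have hsM : s.1 = (M : ℤ) := by omega
      have hModd : Odd M := by
        rcases hodd with ⟨k, hk⟩
        exact Nat.odd_iff.mpr (by omega)
      have hM2 : M % 2 = 1 := Nat.odd_iff.mp hModd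
      have hmod : PySem.Int.mod (N : ℤ) s.1 = (N : ℤ) % (M : ℤ) := by
        rw [hsM]; exact PySem.Int.mod_eq_emod_of_pos (by omega)
      have hbound : ((N : ℤ) % (M : ℤ)).toNat < fuel := by
        have h1 : (N : ℤ) % (M : ℤ) < (M : ℤ) := Int.emod_lt_of_pos _ (by omega)
        omega
      have hIH := ih ((N : ℤ) % (M : ℤ)) r2 M hModd (by omega)
        (Int.emod_nonneg _ (by omega)) hbound
      rw [hstep, hmod, hsM, hIH]
      have hml : jacobiSym ((N : ℤ) % (M : ℤ)) M = jacobiSym (N : ℤ) M :=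
        (jacobiSym.mod_left (N : ℤ) M).symm
      have hrec : jacobiSym ((M : ℕ) : ℤ) N
          = (-1) ^ (M / 2 * (N / 2)) * jacobiSym ((N : ℕ) : ℤ) M :=
        jacobiSym.quadratic_reciprocity hModd hN
      have hm4N : PySem.Int.mod (N : ℤ) 4 = ((N % 4 : ℕ) : ℤ) := by
        rw [PySem.Int.mod_eq_emod_of_pos (by norm_num)]
        push_cast
        rfl
      have hm4M : PySem.Int.mod s.1 4 = ((M % 4 : ℕ) : ℤ) := by
        rw [hsM, PySem.Int.mod_eq_emod_of_pos (by norm_num)]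
        push_cast
        rfl
      have hJa : s.2 * jacobiSym ((M : ℕ) : ℤ) N = r * jacobiSym a N := by
        rw [← heq, ← hsM]
      by_cases h33 : N % 4 = 3 ∧ M % 4 = 3
      · have hcond : PySem.Int.mod (N : ℤ) 4 = 3 ∧ PySem.Int.mod s.1 4 = 3 := by
          rw [hm4N, hm4M, h33.1, h33.2]; norm_num
        have hoddExp : Odd (M / 2 * (N / 2)) := by
          rcases h33 with ⟨hN4, hM4⟩
          exact Nat.odd_mul.mpr ⟨Nat.odd_iff.mpr (by omega), Nat.odd_iff.mpr (by omega)⟩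
        rw [hr2, if_pos hcond]
        rw [hoddExp.neg_one_pow] at hrec
        rw [← hJa, hrec, hml]
        ring
      · have hcond : ¬ (PySem.Int.mod (N : ℤ) 4 = 3 ∧ PySem.Int.mod s.1 4 = 3) := by
          rw [hm4N, hm4M]; omega
        have hevenExp : Even (M / 2 * (N / 2)) := by
          rcases (by omega : M % 4 = 1 ∨ N % 4 = 1) with h | h
          · exact Nat.even_mul.mpr (Or.inl (Nat.even_iff.mpr (by omega)))
          · exact Nat.even_mul.mpr (Or.inr (Nat.even_iff.mpr (by omega)))
        rw [hr2, if_neg hcond]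
        rw [hevenExp.neg_one_pow] at hrec
        rw [← hJa, hrec, hml]
        ring

lemma pvJacobi_eq (g : Int) (N : ℕ) (hN : Odd N) (h1 : 0 < N) :
    pvJacobi g (N : ℤ) = jacobiSym g N := by
  unfold pvJacobi
  have hm : PySem.Int.mod g (N : ℤ) = g % (N : ℤ) := PySem.Int.mod_eq_emod_of_pos (by omega)
  rw [hm, jacLoop_spec _ _ _ N hN h1 (Int.emod_nonneg _ (by omega)) (by omega),
    ← jacobiSym.mod_left]
  ring

-- pointwise agreement of A's loop condition with B's Jacobi test on odd prime p
lemma cond_agree (p : Int) (hp : 2 < p) (hP : Nat.Prime p.toNat)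
    (g : Int) (hg2 : 2 ≤ g) (hgp : g < p) :
    (pvPow g (PySem.Int.floordiv (p - 1) 2) p ≠ 1 ∧ pvPow g (p - 1) p = 1) ↔ pvJacobi g p = -1 := by
  haveI : Fact (p.toNat.Prime) := ⟨hP⟩
  have h1P : 1 < p.toNat := hP.one_lt
  have hpP : ((p.toNat : ℕ) : ℤ) = p := Int.toNat_of_nonneg (by omega)
  have hoddP : p.toNat % 2 = 1 := by
    rcases hP.odd_of_ne_two (by omega) with ⟨k, hk⟩; omega
  have hgne : (g : ZMod p.toNat) ≠ 0 := by
    intro h0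
    rw [ZMod.intCast_zmod_eq_zero_iff_dvd] at h0
    have := Int.le_of_dvd (by omega) h0
    omega
  have hF : pvPow g (p - 1) p = 1 := by
    rw [pvPow_eq g (p - 1) p (by omega) (by omega)]
    have h1 : (p - 1).toNat = p.toNat - 1 := by omega
    rw [pow_emod_eq_one_iff p (by omega), h1]
    exact ZMod.pow_card_sub_one_eq_one hgne
  have hfd : PySem.Int.floordiv (p - 1) 2 = (p - 1) / 2 :=
    PySem.Int.floordiv_eq_ediv_of_pos (by norm_num)
  have hE : pvPow g (PySem.Int.floordiv (p - 1) 2) p = 1 ↔ IsSquare ((g : ZMod p.toNat)) := by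
    rw [hfd, pvPow_eq g _ p (by omega) (by omega)]
    have h2 : ((p - 1) / 2).toNat = p.toNat / 2 := by omega
    rw [pow_emod_eq_one_iff p (by omega), h2]
    exact (ZMod.euler_criterion p.toNat hgne).symm
  have hJ : pvJacobi g p = -1 ↔ ¬ IsSquare ((g : ZMod p.toNat)) := by
    conv_lhs => rw [← hpP, pvJacobi_eq g p.toNat (Nat.odd_iff.mpr hoddP) (by omega),
      ← jacobiSym.legendreSym.to_jacobiSym]
    exact legendreSym.eq_neg_one_iff p.toNat
  constructor
  · exact fun h => hJ.mpr (fun hs => h.1 (hE.mpr hs))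
  · exact fun h => ⟨fun h1 => (hJ.mp h) (hE.mp h1), hF⟩

-- A's counter loop computes exactly B's lazy Jacobi scan
lemma scan_agree (p : Int) (hp : 2 < p) (hP : Nat.Prime p.toNat) :
    ∀ n : ℕ, ∀ g : Int, (p - g).toNat ≤ n → 2 ≤ g →
      pvGenLoopA p g = pvScanB p g := by
  intro n
  induction n with
  | zero =>
    intro g hn _
    rw [pvGenLoopA, dif_neg (by omega), pvScanB, dif_neg (by omega)]
  | succ n ih =>
    intro g hn hg2
    by_cases hgp : g < p
    · rw [pvGenLoopA, dif_pos hgp, pvScanB, dif_pos hgp]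
      have hc := cond_agree p hp hP g hg2 hgp
      by_cases hA : pvPow g (PySem.Int.floordiv (p - 1) 2) p ≠ 1 ∧ pvPow g (p - 1) p = 1
      · have hj : (pvJacobi g p == -1) = true := beq_iff_eq.mpr (hc.mp hA)
        rw [if_pos hA, hj, if_pos rfl]
      · have hj : (pvJacobi g p == -1) = false := by
          rw [beq_eq_false_iff_ne]
          exact fun hs => hA (hc.mpr hs)
        rw [if_neg hA, hj, ih (g + 1) (by omega) (by omega)]
        simp
    · rw [pvGenLoopA, dif_neg hgp, pvScanB, dif_neg hgp]

-- ===== VERDICT (by name: the statement is the Claim_ definition above) =====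
theorem get_generator_spec : Claim_equal_get_generator := by
  intro p _ hpre
  obtain ⟨hp2, hP⟩ := hpre
  unfold Spec_get_generator get_generator get_generator_alt
  have hA : pvIsPrime p = true := pvIsPrime_of_prime p hp2 hP
  have hB : pvTrial p 2 = true := pvTrial_of_prime p hp2 hP (p - 1).toNat 2 (by omega) le_rfl
  rw [hA, hB, if_neg (by omega : ¬ p < 2)]
  simp only [not_true_eq_false, if_false]
  by_cases hp2' : p = 2
  · simp only [if_pos hp2']
  · simp only [if_neg hp2']
    exact scan_agree p (by omega) hP (p - 2).toNat 2 le_rfl le_rfl
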